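-- pv_equiv track=rewrite | github.com/Vania-Dev/posadasdecodigo | 08/08.py | solve
-- ===== SOURCE A (Python) =====
-- from itertools import combinations
--
-- class DSU:
--     """Disjoint Set Union (Union-Find) para agrupar elementos en conjuntos."""
--     def __init__(self, n):
--         # Inicializa cada elemento como su propio padre
--         self.parent = list(range(n))
--         # Inicializa el tamaño de cada conjunto en 1
--         self.size = [1] * n
--
--     def find(self, x):
--         """Encuentra la raíz del conjunto al que pertenece x (con compresión de ruta)."""
--         # Si x no es su propio padre, busca recursivamente y comprime la ruta
--         if self.parent[x] != x:
--             self.parent[x] = self.find(self.parent[x])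
--         # Retorna la raíz del conjunto
--         return self.parent[x]
--
--     def union(self, a, b):
--         """Une los conjuntos que contienen a y b."""
--         # Encuentra las raíces de ambos elementos
--         ra = self.find(a)
--         rb = self.find(b)
--         # Si ya están en el mismo conjunto, no hace nada
--         if ra == rb:
--             return False
--         # Une el conjunto más pequeño al más grande
--         if self.size[ra] < self.size[rb]:
--             ra, rb = rb, ra
--         # Actualiza el padre del conjunto más pequeño
--         self.parent[rb] = ra
--         # Actualiza el tamaño del conjunto resultante
--         self.size[ra] += self.size[rb]
--         # Retorna True indicando que la unión fue útil
--         return True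
--
-- def solve(points, K):
--     """Conecta los K pares más cercanos y retorna el producto de los 3 grupos más grandes."""
--     # Obtiene el número total de puntos
--     n = len(points)
--     # Crea una estructura DSU para n puntos
--     dsu = DSU(n)
--
--     # Lista para almacenar todas las aristas con sus distancias
--     edges = []
--     # Genera todas las combinaciones posibles de pares de puntos
--     for i, j in combinations(range(n), 2):
--         # Obtiene las coordenadas del primer punto
--         x1, y1, z1 = points[i]
--         # Obtiene las coordenadas del segundo punto
--         x2, y2, z2 = points[j]
--
--         # Calcula la distancia euclidiana al cuadrado (evita raíz cuadrada)
--         dist2 = (x1 - x2)**2 + (y1 - y2)**2 + (z1 - z2)**2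
--
--         # Agrega la arista con su distancia y los índices de los puntos
--         edges.append((dist2, i, j))
--
--     # Ordena las aristas por distancia (de menor a mayor)
--     edges.sort()
--
--     # Conecta los K pares más cercanos
--     for i in range(K):
--         # Extrae la distancia y los índices de los puntos
--         dist2, a, b = edges[i]
--         # Une los dos puntos en el mismo grupo
--         dsu.union(a, b)
--
--     # Cuenta cuántos puntos hay en cada grupo
--     groups = {}
--     for i in range(n):
--         # Encuentra la raíz del grupo al que pertenece el punto i
--         root = dsu.find(i)
--         # Incrementa el contador del grupo
--         groups[root] = groups.get(root, 0) + 1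
--
--     # Ordena los tamaños de los grupos de mayor a menor
--     sizes = sorted(groups.values(), reverse=True)
--     # Retorna el producto de los tres grupos más grandes
--     return sizes[0] * sizes[1] * sizes[2]
-- ===== SOURCE B (Python) =====
-- def solve(points, K):
--     """Conecta los K pares mas cercanos y retorna el producto de los 3 grupos mas grandes."""
--     n = len(points)
--     # all pairwise edges (squared distance, i, j) with i < j
--     edges = []
--     for i in range(n):
--         x1, y1, z1 = points[i]
--         for j in range(i + 1, n):
--             x2, y2, z2 = points[j]
--             edges.append(((x1 - x2) ** 2 + (y1 - y2) ** 2 + (z1 - z2) ** 2, i, j))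
--     edges.sort()
--     # quick-find: comp[i] is the current group label of point i
--     comp = list(range(n))
--     for _, a, b in edges[:max(K, 0)]:
--         ca, cb = comp[a], comp[b]
--         if ca != cb:
--             comp = [ca if c == cb else c for c in comp]
--     # count group sizes directly from the label array
--     counts = {}
--     for c in comp:
--         counts[c] = counts.get(c, 0) + 1
--     sizes = sorted(counts.values(), reverse=True)
--     return sizes[0] * sizes[1] * sizes[2]
-- ===== Notes on version B (the rewrite author's own statement) =====
-- stated objective: alternative
-- what changed: Replaces the path-compressing union-by-size DSU (recursive find per union and per point when counting) with a flat quick-find label array that is relabelled on each merging edge and counted directly, taking the K closest edges as a slice of the sorted edge list.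
import Mathlib
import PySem

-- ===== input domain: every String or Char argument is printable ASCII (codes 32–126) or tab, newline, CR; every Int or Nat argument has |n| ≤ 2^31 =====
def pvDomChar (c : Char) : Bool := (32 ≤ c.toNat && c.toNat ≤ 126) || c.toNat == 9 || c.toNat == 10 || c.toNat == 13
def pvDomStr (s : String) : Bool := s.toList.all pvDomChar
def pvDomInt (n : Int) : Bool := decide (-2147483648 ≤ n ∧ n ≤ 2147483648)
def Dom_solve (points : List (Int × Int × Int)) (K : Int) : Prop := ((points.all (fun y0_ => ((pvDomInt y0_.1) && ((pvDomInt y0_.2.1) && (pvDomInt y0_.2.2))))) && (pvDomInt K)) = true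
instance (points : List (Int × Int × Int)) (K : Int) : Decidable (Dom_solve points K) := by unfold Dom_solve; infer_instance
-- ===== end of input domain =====

-- B replaces A's path-compressing union-by-size DSU with a flat quick-find label array
-- (relabel on each merging edge, count labels directly); same value wherever A returns.

-- ===== PORT A =====

-- the edge tuple (dist2, i, j) A builds for a pair of point indices
def pvEdgeA (points : List (Int × Int × Int)) (i j : Nat) : Int × Nat × Nat :=
  let p1 := points.getD i (0, 0, 0)   -- index always in range
  let p2 := points.getD j (0, 0, 0)
  ((p1.1 - p2.1) ^ 2 + (p1.2.1 - p2.2.1) ^ 2 + (p1.2.2 - p2.2.2) ^ 2, i, j)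

-- DSU.find with path compression; fuel = len(parent) bounds the (always shorter) parent chain
def pvFind : Nat → List Nat → Nat → List Nat × Nat
  | 0, parent, x => (parent, x)     -- fuel never exhausted on parent forests (see lemmas below)
  | f+1, parent, x =>
    let p := parent.getD x x
    if p = x then (parent, x)
    else
      let pr := pvFind f parent p
      (pr.1.set x pr.2, pr.2)

-- DSU.union (union by size); state = (parent, size)
def pvUnion (st : List Nat × List Int) (a b : Nat) : List Nat × List Int :=
  let r1 := pvFind st.1.length st.1 a
  let r2 := pvFind r1.1.length r1.1 b
  let ra := r1.2
  let rb := r2.2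
  if ra = rb then (r2.1, st.2)
  else
    let pr := if st.2.getD ra 0 < st.2.getD rb 0 then (rb, ra) else (ra, rb)
    (r2.1.set pr.2 pr.1, st.2.set pr.1 (st.2.getD pr.1 0 + st.2.getD pr.2 0))

def solve (points : List (Int × Int × Int)) (K : Int) : Int :=
  let n := points.length
  -- edges from itertools.combinations(range(n), 2)
  let edges : List (Int × Nat × Nat) :=
    (PySem.List.combinations (List.range n) 2).foldl (fun acc c =>
      match c with
      | [i, j] => acc ++ [pvEdgeA points i j]
      | _ => acc) []
  let sedges := PySem.List.sorted edges (fun e => toLex (e.1, toLex ((e.2.1 : Int), (e.2.2 : Int))))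
  -- for i in range(K): union the endpoints of edges[i]
  let st := (PySem.List.pyRange 0 K 1).foldl (fun st i =>
      match PySem.List.pyGet? sedges i with
      | some e => pvUnion st e.2.1 e.2.2
      | none => st                           -- Python raises IndexError here; excluded by Pre_solve
    ) (List.range n, List.replicate n (1 : Int))
  -- groups[find(i)] += 1
  let fin := (List.range n).foldl (fun (pg : List Nat × PySem.Dict Nat Int) i =>
      let fr := pvFind pg.1.length pg.1 i
      (fr.1, pg.2.insert fr.2 (pg.2.getD fr.2 0 + 1))) (st.1, PySem.Dict.empty)
  let sizes := PySem.List.sorted fin.2.values (fun v => v) true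
  match PySem.List.pyGet? sizes 0, PySem.List.pyGet? sizes 1, PySem.List.pyGet? sizes 2 with
  | some a, some b, some c => a * b * c
  | _, _, _ => 0                             -- Python raises IndexError here; excluded by Pre_solve

-- ===== PORT B =====

-- the edge tuple (dist2, i, j) B builds for a pair of point indices
def pvEdgeB (points : List (Int × Int × Int)) (i j : Nat) : Int × Nat × Nat :=
  let p1 := points.getD i (0, 0, 0)   -- index always in range
  let p2 := points.getD j (0, 0, 0)
  ((p1.1 - p2.1) ^ 2 + (p1.2.1 - p2.2.1) ^ 2 + (p1.2.2 - p2.2.2) ^ 2, i, j)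

def solve_alt (points : List (Int × Int × Int)) (K : Int) : Int :=
  let n := points.length
  -- nested loops: for i in range(n): for j in range(i+1, n)
  let edges : List (Int × Nat × Nat) :=
    (List.range n).foldl (fun acc i =>
      ((List.range n).drop (i+1)).foldl (fun acc2 j =>
        acc2 ++ [pvEdgeB points i j]) acc) []
  let sedges := PySem.List.sorted edges (fun e => toLex (e.1, toLex ((e.2.1 : Int), (e.2.2 : Int))))
  let picked := PySem.List.slice sedges none (some (max K 0))    -- edges[:max(K, 0)]
  -- quick-find: comp[i] = current group label of point i; relabel cb -> ca on a merging edge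
  let comp := picked.foldl (fun comp e =>
      let ca := comp.getD e.2.1 0
      let cb := comp.getD e.2.2 0
      if ca ≠ cb then comp.map (fun c => if c = cb then ca else c) else comp) (List.range n)
  -- counts[c] += 1 directly over the label array
  let counts := comp.foldl (fun (d : PySem.Dict Nat Int) c => d.insert c (d.getD c 0 + 1)) PySem.Dict.empty
  let sizes := PySem.List.sorted counts.values (fun v => v) true
  match PySem.List.pyGet? sizes 0 with
  | none => 0                                -- Python raises IndexError here; excluded by Pre_solve
  | some a =>
    match PySem.List.pyGet? sizes 1 with
    | none => 0
    | some b =>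
      match PySem.List.pyGet? sizes 2 with
      | none => 0
      | some c => a * b * c

-- ===== PRECONDITION & SPEC =====

-- Pre_-side helpers (independent of both ports): the K closest pairs of the input,
-- and the partition they generate, computed by merging explicit classes.
def pvPairDist2 (points : List (Int × Int × Int)) (i j : Nat) : Int :=
  let p1 := points.getD i (0, 0, 0)
  let p2 := points.getD j (0, 0, 0)
  (p1.1 - p2.1) ^ 2 + (p1.2.1 - p2.2.1) ^ 2 + (p1.2.2 - p2.2.2) ^ 2

-- the K closest index pairs (ties broken like Python's tuple sort: by (dist2, i, j))
def pvChosen (points : List (Int × Int × Int)) (K : Int) : List (Nat × Nat) :=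
  let n := points.length
  let edges := (List.range n).flatMap (fun i =>
    ((List.range n).drop (i+1)).map (fun j => (pvPairDist2 points i j, i, j)))
  ((PySem.List.sorted edges (fun e => toLex (e.1, toLex ((e.2.1 : Int), (e.2.2 : Int))))).take
    (max K 0).toNat).map (fun e => (e.2.1, e.2.2))

-- classes of the partition of range n generated by the pairs es
def pvGroups (n : Nat) (es : List (Nat × Nat)) : List (List Nat) :=
  es.foldl (fun cs e =>
    if cs.any (fun c => c.contains e.1 && c.contains e.2) then cs
    else (cs.filter (fun c => !(c.contains e.1 || c.contains e.2))) ++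
         [(cs.filter (fun c => c.contains e.1 || c.contains e.2)).flatten])
    ((List.range n).map (fun i => [i]))

-- Pre_solve is EXACTLY the set of inputs on which the Python A returns: A raises IndexError
-- iff K exceeds the number of point pairs (edges[i] out of range) or the K closest pairs
-- leave fewer than 3 groups (sizes[2] out of range); no input on which A returns is excluded.
def Pre_solve (points : List (Int × Int × Int)) (K : Int) : Prop :=
  K ≤ ((points.length : Int) * ((points.length : Int) - 1)) / 2 ∧
  3 ≤ (pvGroups points.length (pvChosen points K)).length
instance (points : List (Int × Int × Int)) (K : Int) : Decidable (Pre_solve points K) := by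
  unfold Pre_solve; infer_instance

def pvWitness_solve : (List (Int × Int × Int)) × Int := ([(0,0,0), (1,0,0), (2,0,0)], 0)

def Spec_solve (points : List (Int × Int × Int)) (K : Int) (out : Int) : Prop := out = solve_alt points K
instance (points : List (Int × Int × Int)) (K : Int) (out : Int) : Decidable (Spec_solve points K out) := by unfold Spec_solve; infer_instance

-- ===== CLAIM (what is proved, stated in full; the proofs are below) =====
def Claim_equal_solve : Prop := ∀ (points : List (Int × Int × Int)) (K : Int), Dom_solve points K → Pre_solve points K → Spec_solve points K (solve points K)

-- ===== LEMMAS AND PROOFS =====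

-- ---------- pure root-chasing (proof-side model of the DSU forest) ----------

def pvStep (p : List Nat) (x : Nat) : Nat := p.getD x x

def pvIsRoot (p : List Nat) (x : Nat) : Prop := pvStep p x = x

def pvIter (p : List Nat) : Nat → Nat → Nat
  | 0, x => x
  | k+1, x => pvIter p k (pvStep p x)

def pvRootF (p : List Nat) : Nat → Nat → Nat
  | 0, x => x
  | f+1, x => if pvStep p x = x then x else pvRootF p f (pvStep p x)

-- forest invariant: right length, bounded entries, an (arbitrary) strictly decreasing depth measure
def pvGood (p : List Nat) (n : Nat) (dep : Nat → Nat) : Prop :=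
  p.length = n ∧ (∀ x, x < n → pvStep p x < n) ∧
  (∀ x, x < n → ¬ pvIsRoot p x → dep (pvStep p x) < dep x)

def pvRoot (p : List Nat) (n : Nat) (x : Nat) : Nat := pvRootF p n x

-- coupling invariant: roots of A's parent array and B's label array induce the same partition
def pvRel (p : List Nat) (comp : List Nat) (n : Nat) : Prop :=
  comp.length = n ∧
  ∀ x y, x < n → y < n → (pvRoot p n x = pvRoot p n y ↔ comp.getD x 0 = comp.getD y 0)

theorem pvIter_add (p : List Nat) (k m x : Nat) :
    pvIter p (k + m) x = pvIter p m (pvIter p k x) := by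
  induction k generalizing x with
  | zero => simp [pvIter]
  | succ k ih => rw [Nat.add_right_comm] ; simpa [pvIter] using ih (pvStep p x)

theorem pvIter_root (p : List Nat) {x : Nat} (h : pvIsRoot p x) (k : Nat) : pvIter p k x = x := by
  induction k with
  | zero => rfl
  | succ k ih => simp [pvIter, pvIsRoot] at *; rw [h]; exact ih

theorem pvIter_stable (p : List Nat) {k x : Nat} (h : pvIsRoot p (pvIter p k x)) {m : Nat}
    (hm : k ≤ m) : pvIter p m x = pvIter p k x := by
  obtain ⟨d, rfl⟩ := Nat.exists_eq_add_of_le hm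
  rw [pvIter_add]; exact pvIter_root p h d

theorem pvRootF_eq_pvIter (p : List Nat) {f k x : Nat} (hk : k ≤ f)
    (h : pvIsRoot p (pvIter p k x)) :
    pvRootF p f x = pvIter p f x ∧ pvIsRoot p (pvRootF p f x) := by
  induction f generalizing x k with
  | zero => interval_cases k; exact ⟨rfl, h⟩
  | succ f ih =>
    by_cases hr : pvIsRoot p x
    · simp only [pvRootF, pvIsRoot] at *
      simp [hr, pvIter_root p hr]
    · have hk1 : 1 ≤ k := by
        rcases Nat.eq_zero_or_pos k with rfl | h1
        · exact absurd h hr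
        · exact h1
      have hxk : pvIter p k x = pvIter p (k-1) (pvStep p x) := by
        conv_lhs => rw [show k = (k-1)+1 by omega]
        rfl
      rw [hxk] at h
      obtain ⟨h1, h2⟩ := ih (k := k - 1) (by omega) h
      have hstep : pvStep p x ≠ x := hr
      constructor
      · show (if pvStep p x = x then x else pvRootF p f (pvStep p x)) = pvIter p f (pvStep p x)
        simp [hstep, h1]
      · show pvIsRoot p (if pvStep p x = x then x else pvRootF p f (pvStep p x))
        simp [hstep, h2]

theorem pvGetD_set_self (l : List Nat) (i v d : Nat) (h : i < l.length) :
    (l.set i v).getD i d = v := by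
  simp [List.getD, h]

theorem pvGetD_set_ne (l : List Nat) (i j v d : Nat) (h : j ≠ i) :
    (l.set i v).getD j d = l.getD j d := by
  simp [List.getD, List.getElem?_set_ne (Ne.symm h)]

theorem pvIter_succ_right (p : List Nat) (k x : Nat) :
    pvIter p (k+1) x = pvStep p (pvIter p k x) := by
  have := pvIter_add p k 1 x
  rw [Nat.add_comm] at this ⊢
  rw [this]; rfl

theorem pvIter_lt {p : List Nat} {n : Nat} {dep : Nat → Nat} (hg : pvGood p n dep)
    {x : Nat} (hx : x < n) (k : Nat) : pvIter p k x < n := by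
  induction k generalizing x with
  | zero => exact hx
  | succ k ih => exact ih (hg.2.1 x hx)

theorem pvReach (p : List Nat) (n : Nat) (dep : Nat → Nat) (hg : pvGood p n dep)
    {x : Nat} (hx : x < n) : ∃ k, k < n ∧ pvIsRoot p (pvIter p k x) := by
  by_contra hno0
  have hno : ∀ k, k < n → ¬ pvIsRoot p (pvIter p k x) := by
    intro k hk hroot
    exact hno0 ⟨k, hk, hroot⟩
  have hlt : ∀ k, pvIter p k x < n := pvIter_lt hg hx
  have hstep : ∀ i, i < n → dep (pvIter p (i+1) x) < dep (pvIter p i x) := by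
    intro i hi
    rw [pvIter_succ_right]
    exact hg.2.2 _ (hlt i) (hno i hi)
  have hdec : ∀ i j, i < j → j ≤ n → dep (pvIter p j x) < dep (pvIter p i x) := by
    intro i j hij hj
    induction j with
    | zero => omega
    | succ j ih =>
      rcases Nat.lt_or_ge i j with h' | h'
      · exact lt_trans (hstep j (by omega)) (ih h' (by omega))
      · have : i = j := by omega
        subst this
        exact hstep i (by omega)
  have hinj : Function.Injective (fun k : Fin (n+1) => (⟨pvIter p k x, hlt k⟩ : Fin n)) := by
    intro i j hij
    simp only [Fin.mk.injEq] at hij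
    by_contra hne
    rcases Nat.lt_or_ge i.val j.val with h' | h'
    · have hd := hdec i j h' (by omega)
      rw [hij] at hd
      exact lt_irrefl _ hd
    · have hji : j.val < i.val := by
        rcases Nat.lt_or_ge j.val i.val with h2 | h2
        · exact h2
        · exact absurd (Fin.ext (by omega)) hne
      have hd := hdec j i hji (by omega)
      rw [hij] at hd
      exact lt_irrefl _ hd
  have := Fintype.card_le_of_injective _ hinj
  simp at this

theorem pvRoot_spec (p : List Nat) (n : Nat) (dep : Nat → Nat) (hg : pvGood p n dep)
    {x : Nat} (hx : x < n) : pvIsRoot p (pvRoot p n x) ∧ pvRoot p n x < n := by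
  obtain ⟨k, hk, hr⟩ := pvReach p n dep hg hx
  obtain ⟨h1, h2⟩ := pvRootF_eq_pvIter p (f := n) (by omega) hr
  exact ⟨h2, by rw [pvRoot, h1]; exact pvIter_lt hg hx n⟩

theorem pvRoot_eq_of_reach (p : List Nat) (n : Nat) (dep : Nat → Nat) (hg : pvGood p n dep)
    {x k : Nat} (hx : x < n) (h : pvIsRoot p (pvIter p k x)) : pvRoot p n x = pvIter p k x := by
  obtain ⟨k0, hk0, hr0⟩ := pvReach p n dep hg hx
  obtain ⟨h1, _⟩ := pvRootF_eq_pvIter p (f := n) (by omega) hr0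
  have e0 : pvIter p n x = pvIter p k0 x := pvIter_stable p hr0 (by omega)
  rcases Nat.le_total k k0 with hle | hle
  · have := pvIter_stable p h (m := k0) hle
    rw [pvRoot, h1, e0, this]
  · have := pvIter_stable p hr0 (m := k) hle
    rw [pvRoot, h1, e0, ← this]

theorem pvRoot_step (p : List Nat) (n : Nat) (dep : Nat → Nat) (hg : pvGood p n dep)
    {x : Nat} (hx : x < n) (_hr : ¬ pvIsRoot p x) : pvRoot p n x = pvRoot p n (pvStep p x) := by
  have hs : pvStep p x < n := hg.2.1 x hx
  obtain ⟨k, hk, hroot⟩ := pvReach p n dep hg hs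
  have h2 : pvIsRoot p (pvIter p (k+1) x) := by
    have : pvIter p (k+1) x = pvIter p k (pvStep p x) := rfl
    rwa [this]
  rw [pvRoot_eq_of_reach p n dep hg hx h2, pvRoot_eq_of_reach p n dep hg hs hroot]
  rfl

theorem pvRoot_of_isRoot (p : List Nat) (n : Nat) {x : Nat} (h : pvIsRoot p x) :
    pvRoot p n x = x := by
  obtain ⟨h1, _⟩ := pvRootF_eq_pvIter p (k := 0) (f := n) (by omega) h
  rw [pvRoot, h1, pvIter_root p h]

-- dep strictly drops from any non-root to its root
theorem pvDep_le_iter {p : List Nat} {n : Nat} {dep : Nat → Nat} (hg : pvGood p n dep)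
    {x : Nat} (hx : x < n) (k : Nat) : dep (pvIter p k x) ≤ dep x := by
  induction k generalizing x with
  | zero => exact le_refl _
  | succ k ih =>
    by_cases hr : pvIsRoot p x
    · show dep (pvIter p k (pvStep p x)) ≤ dep x
      rw [show pvStep p x = x from hr]
      exact ih hx
    · calc dep (pvIter p k (pvStep p x)) ≤ dep (pvStep p x) := ih (hg.2.1 x hx)
        _ ≤ dep x := le_of_lt (hg.2.2 x hx hr)

theorem pvDep_root_lt {p : List Nat} {n : Nat} {dep : Nat → Nat} (hg : pvGood p n dep)
    {x : Nat} (hx : x < n) (hr : ¬ pvIsRoot p x) : dep (pvRoot p n x) < dep x := by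
  obtain ⟨k, hk, hroot⟩ := pvReach p n dep hg (hg.2.1 x hx)
  have h2 : pvIsRoot p (pvIter p (k+1) x) := hroot
  rw [pvRoot_eq_of_reach p n dep hg hx h2]
  show dep (pvIter p k (pvStep p x)) < dep x
  calc dep (pvIter p k (pvStep p x)) ≤ dep (pvStep p x) := pvDep_le_iter hg (hg.2.1 x hx) k
    _ < dep x := hg.2.2 x hx hr

-- setting x's parent to its own root preserves the invariant and every root
theorem pvCompress (q : List Nat) (n : Nat) (dep : Nat → Nat) (hg : pvGood q n dep)
    {x : Nat} (hx : x < n) :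
    pvGood (q.set x (pvRoot q n x)) n dep ∧
    (∀ y, y < n → pvRoot (q.set x (pvRoot q n x)) n y = pvRoot q n y) := by
  set r := pvRoot q n x with hrdef
  have hlen : q.length = n := hg.1
  have hrlt : r < n := (pvRoot_spec q n dep hg hx).2
  have hrroot : pvIsRoot q r := (pvRoot_spec q n dep hg hx).1
  have hstep_eq : ∀ y, y ≠ x → pvStep (q.set x r) y = pvStep q y := by
    intro y hy
    exact pvGetD_set_ne q x y r y hy
  have hstep_x : pvStep (q.set x r) x = r :=
    pvGetD_set_self q x r x (by omega)
  have hg' : pvGood (q.set x r) n dep := by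
    refine ⟨by simp [hlen], ?_, ?_⟩
    · intro y hy
      by_cases hyx : y = x
      · rw [hyx, hstep_x]; exact hrlt
      · rw [hstep_eq y hyx]; exact hg.2.1 y hy
    · intro y hy hnr
      by_cases hyx : y = x
      · rw [hyx, hstep_x]
        rw [hyx] at hnr
        have hxnr : ¬ pvIsRoot q x := by
          intro hroot
          apply hnr
          rw [pvIsRoot, hstep_x, hrdef, pvRoot_of_isRoot q n hroot]
        exact pvDep_root_lt hg hx hxnr
      · rw [hstep_eq y hyx]
        apply hg.2.2 y hy
        intro hroot
        exact hnr (by rw [pvIsRoot, hstep_eq y hyx]; exact hroot)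
  refine ⟨hg', ?_⟩
  have main : ∀ d y, y < n → dep y < d → pvRoot (q.set x r) n y = pvRoot q n y := by
    intro d
    induction d with
    | zero => omega
    | succ d ih =>
      intro y hy hdy
      by_cases hyx : y = x
      · rw [hyx]
        by_cases hxr : r = x
        · have hroot' : pvIsRoot (q.set x r) x := by rw [pvIsRoot, hstep_x]; exact hxr
          rw [pvRoot_of_isRoot _ n hroot']
          exact hxr.symm.trans hrdef
        · have hroot' : ¬ pvIsRoot (q.set x r) x := by rw [pvIsRoot, hstep_x]; exact hxr
          rw [pvRoot_step _ n dep hg' hx hroot', hstep_x]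
          have hrr' : pvIsRoot (q.set x r) r := by
            rw [pvIsRoot, hstep_eq r hxr]; exact hrroot
          rw [pvRoot_of_isRoot _ n hrr']
      · by_cases hqroot : pvIsRoot q y
        · have hroot' : pvIsRoot (q.set x r) y := by rw [pvIsRoot, hstep_eq y hyx]; exact hqroot
          rw [pvRoot_of_isRoot _ n hroot', pvRoot_of_isRoot q n hqroot]
        · have hroot' : ¬ pvIsRoot (q.set x r) y := by rw [pvIsRoot, hstep_eq y hyx]; exact hqroot
          rw [pvRoot_step _ n dep hg' hy hroot', pvRoot_step q n dep hg hy hqroot,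
              hstep_eq y hyx]
          exact ih (pvStep q y) (hg.2.1 y hy) (by have := hg.2.2 y hy hqroot; omega)
  intro y hy
  exact main (dep y + 1) y hy (by omega)

-- find / union lemmas
-- find on a root is the identity
theorem pvFind_root {p : List Nat} {x : Nat} (h : pvIsRoot p x) {f : Nat} (hf : 0 < f) :
    pvFind f p x = (p, x) := by
  obtain ⟨f', rfl⟩ : ∃ f', f = f'+1 := ⟨f-1, by omega⟩
  have hr : p.getD x x = x := h
  show (if p.getD x x = x then (p, x) else
      ((pvFind f' p (p.getD x x)).1.set x (pvFind f' p (p.getD x x)).2,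
       (pvFind f' p (p.getD x x)).2)) = (p, x)
  rw [if_pos hr]

-- find: returns the root, preserves the invariant (same dep) and every root
theorem pvFind_spec (n : Nat) (dep : Nat → Nat) :
    ∀ (k : Nat) (p : List Nat) (x : Nat) (f : Nat), pvGood p n dep → x < n →
    pvIsRoot p (pvIter p k x) → k < f →
    (pvFind f p x).2 = pvRoot p n x ∧ pvGood (pvFind f p x).1 n dep ∧
    (∀ y, y < n → pvRoot (pvFind f p x).1 n y = pvRoot p n y) := by
  intro k
  induction k with
  | zero =>
    intro p x f hg hx hroot hkf
    have hroot0 : pvIsRoot p x := hroot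
    rw [pvFind_root hroot0 (by omega)]
    exact ⟨(pvRoot_of_isRoot p n hroot0).symm, hg, fun y hy => rfl⟩
  | succ k ih =>
    intro p x f hg hx hroot hkf
    by_cases hr : pvIsRoot p x
    · rw [pvFind_root hr (by omega)]
      exact ⟨(pvRoot_of_isRoot p n hr).symm, hg, fun y hy => rfl⟩
    · obtain ⟨f', rfl⟩ : ∃ f', f = f'+1 := ⟨f-1, by omega⟩
      have hs : pvStep p x < n := hg.2.1 x hx
      have hroot' : pvIsRoot p (pvIter p k (pvStep p x)) := hroot
      obtain ⟨ih1, ih2, ih3⟩ := ih p (pvStep p x) f' hg hs hroot' (by omega)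
      have hrx : ¬ p.getD x x = x := hr
      have hunf : pvFind (f'+1) p x =
          ((pvFind f' p (pvStep p x)).1.set x (pvFind f' p (pvStep p x)).2,
           (pvFind f' p (pvStep p x)).2) := by
        show (if p.getD x x = x then (p, x) else
          ((pvFind f' p (p.getD x x)).1.set x (pvFind f' p (p.getD x x)).2,
           (pvFind f' p (p.getD x x)).2)) = _
        rw [if_neg hrx]
        rfl
      set pr := pvFind f' p (pvStep p x) with hprdef
      have hval : pr.2 = pvRoot p n x := by
        rw [ih1, pvRoot_step p n dep hg hx hr]
      have hval1 : pr.2 = pvRoot pr.1 n x := by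
        rw [hval, ih3 x hx]
      obtain ⟨hcg, hcr⟩ := pvCompress pr.1 n dep ih2 (x := x) hx
      rw [hunf]
      refine ⟨hval, ?_, ?_⟩
      · simpa [← hval1] using hcg
      · intro y hy
        have := hcr y hy
        rw [← hval1] at this
        rw [this]
        exact ih3 y hy

theorem pvFind_use {n : Nat} {dep : Nat → Nat} {p : List Nat} {x : Nat} {f : Nat}
    (hg : pvGood p n dep) (hx : x < n) (hf : n ≤ f) :
    (pvFind f p x).2 = pvRoot p n x ∧ pvGood (pvFind f p x).1 n dep ∧
    (∀ y, y < n → pvRoot (pvFind f p x).1 n y = pvRoot p n y) := by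
  obtain ⟨k, hk, hroot⟩ := pvReach p n dep hg hx
  exact pvFind_spec n dep k p x f hg hx hroot (by omega)

-- union of two distinct roots: the merged partition
theorem pvSet_root (p : List Nat) (n : Nat) (dep : Nat → Nat) (hg : pvGood p n dep)
    {ra rb : Nat} (hra : ra < n) (hrb : rb < n) (hr1 : pvIsRoot p ra) (hr2 : pvIsRoot p rb)
    (hne : ra ≠ rb) :
    (∃ dep', pvGood (p.set rb ra) n dep') ∧
    (∀ y, y < n → pvRoot (p.set rb ra) n y = if pvRoot p n y = rb then ra else pvRoot p n y) := by
  have hlen : p.length = n := hg.1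
  set dep' : Nat → Nat := fun y => if pvRoot p n y = rb then dep y + dep ra + 1 else dep y
    with hdep'
  have hstep_eq : ∀ y, y ≠ rb → pvStep (p.set rb ra) y = pvStep p y := by
    intro y hy
    exact pvGetD_set_ne p rb y ra y hy
  have hstep_rb : pvStep (p.set rb ra) rb = ra :=
    pvGetD_set_self p rb ra rb (by omega)
  have hshift : ∀ y, y < n → ¬ pvIsRoot p y → dep' (pvStep p y) = (if pvRoot p n y = rb then dep (pvStep p y) + dep ra + 1 else dep (pvStep p y)) := by
    intro y hy hnr
    rw [hdep']
    simp only
    rw [pvRoot_step p n dep hg hy hnr]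
  have hg' : pvGood (p.set rb ra) n dep' := by
    refine ⟨by simp [hlen], ?_, ?_⟩
    · intro y hy
      by_cases hyb : y = rb
      · rw [hyb, hstep_rb]; exact hra
      · rw [hstep_eq y hyb]; exact hg.2.1 y hy
    · intro y hy hnr
      by_cases hyb : y = rb
      · rw [hyb, hstep_rb, hdep']
        simp only
        rw [pvRoot_of_isRoot p n hr2, if_pos rfl, pvRoot_of_isRoot p n hr1, if_neg hne]
        omega
      · rw [hstep_eq y hyb]
        have hpnr : ¬ pvIsRoot p y := by
          intro hroot
          exact hnr (by rw [pvIsRoot, hstep_eq y hyb]; exact hroot)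
        have hdlt := hg.2.2 y hy hpnr
        rw [hshift y hy hpnr, hdep']
        simp only
        split_ifs <;> omega
  refine ⟨⟨dep', hg'⟩, ?_⟩
  have hra_root' : pvIsRoot (p.set rb ra) ra := by
    rw [pvIsRoot, hstep_eq ra hne]; exact hr1
  have main : ∀ d y, y < n → dep' y < d →
      pvRoot (p.set rb ra) n y = if pvRoot p n y = rb then ra else pvRoot p n y := by
    intro d
    induction d with
    | zero => omega
    | succ d ih =>
      intro y hy hdy
      by_cases hyb : y = rb
      · have hnr' : ¬ pvIsRoot (p.set rb ra) rb := by
          rw [pvIsRoot, hstep_rb]; exact hne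
        rw [hyb, pvRoot_step _ n dep' hg' hrb hnr', hstep_rb,
            pvRoot_of_isRoot _ n hra_root', pvRoot_of_isRoot p n hr2, if_pos rfl]
      · by_cases hqroot : pvIsRoot p y
        · have hroot' : pvIsRoot (p.set rb ra) y := by
            rw [pvIsRoot, hstep_eq y hyb]; exact hqroot
          rw [pvRoot_of_isRoot _ n hroot', pvRoot_of_isRoot p n hqroot, if_neg hyb]
        · have hroot' : ¬ pvIsRoot (p.set rb ra) y := by
            intro hroot
            exact hqroot (by rw [pvIsRoot, ← hstep_eq y hyb]; exact hroot)
          have hsn : pvStep p y < n := hg.2.1 y hy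
          rw [pvRoot_step _ n dep' hg' hy hroot', hstep_eq y hyb,
              pvRoot_step p n dep hg hy hqroot]
          apply ih (pvStep p y) hsn
          have h1 := hg.2.2 y hy hqroot
          have h2 := hshift y hy hqroot
          rw [hdep'] at hdy ⊢
          simp only at hdy ⊢
          rw [pvRoot_step p n dep hg hy hqroot] at hdy
          split_ifs at hdy ⊢ <;> omega
  intro y hy
  exact main (dep' y + 1) y hy (by omega)

-- ---------- the union loop, coupled with B's quick-find relabelling ----------

-- B's loop body as a function (definitionally the fold body of solve_alt)
def pvBStep (comp : List Nat) (a b : Nat) : List Nat :=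
  let ca := comp.getD a 0
  let cb := comp.getD b 0
  if ca ≠ cb then comp.map (fun c => if c = cb then ca else c) else comp

def pvInv (p comp : List Nat) (n : Nat) : Prop :=
  (∃ dep, pvGood p n dep) ∧ pvRel p comp n

theorem pvGetD_map_lt (l : List Nat) (f : Nat → Nat) (x d d' : Nat) (h : x < l.length) :
    (l.map f).getD x d = f (l.getD x d') := by
  rw [List.getD_eq_getElem _ _ (by simpa using h), List.getD_eq_getElem _ _ h, List.getElem_map]

theorem pvCollapse (u v w1 w2 : Nat) :
    ((if w1 = v then u else w1) = (if w2 = v then u else w2)) ↔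
      (w1 = w2 ∨ ((w1 = u ∨ w1 = v) ∧ (w2 = u ∨ w2 = v))) := by
  split_ifs <;> omega

set_option maxHeartbeats 1000000 in
theorem pvUnion_inv (n : Nat) (p comp : List Nat) (size : List Int) (a b : Nat)
    (h : pvInv p comp n) (ha : a < n) (hb : b < n) :
    pvInv (pvUnion (p, size) a b).1 (pvBStep comp a b) n := by
  obtain ⟨dep, hg⟩ := h.1
  have hlenC : comp.length = n := h.2.1
  have hrel := h.2.2
  have hlen : p.length = n := hg.1
  obtain ⟨o1, hg1, rt1⟩ := pvFind_use (f := p.length) hg ha (by omega)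
  set F1 := pvFind p.length p a with hF1
  have hlen1 : F1.1.length = n := hg1.1
  obtain ⟨o2, hg2, rt2⟩ := pvFind_use (f := F1.1.length) hg1 hb (by omega)
  set F2 := pvFind F1.1.length F1.1 b with hF2
  have hRa : F1.2 = pvRoot p n a := o1
  have hRb : F2.2 = pvRoot p n b := by rw [o2, rt1 b hb]
  have hunf : pvUnion (p, size) a b =
      (if F1.2 = F2.2 then (F2.1, size)
       else
        (F2.1.set (if size.getD F1.2 0 < size.getD F2.2 0 then (F2.2, F1.2) else (F1.2, F2.2)).2
                  (if size.getD F1.2 0 < size.getD F2.2 0 then (F2.2, F1.2) else (F1.2, F2.2)).1,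
         size.set (if size.getD F1.2 0 < size.getD F2.2 0 then (F2.2, F1.2) else (F1.2, F2.2)).1
           (size.getD (if size.getD F1.2 0 < size.getD F2.2 0 then (F2.2, F1.2) else (F1.2, F2.2)).1 0 +
            size.getD (if size.getD F1.2 0 < size.getD F2.2 0 then (F2.2, F1.2) else (F1.2, F2.2)).2 0))) := rfl
  have hiff_a : ∀ x, x < n → (pvRoot p n x = pvRoot p n a ↔ comp.getD x 0 = comp.getD a 0) :=
    fun x hx => hrel x a hx ha
  have hiff_b : ∀ x, x < n → (pvRoot p n x = pvRoot p n b ↔ comp.getD x 0 = comp.getD b 0) :=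
    fun x hx => hrel x b hx hb
  by_cases heq : F1.2 = F2.2
  · -- already same set: parent = F2.1, comp unchanged
    have hcab : comp.getD a 0 = comp.getD b 0 := by
      rw [← hiff_b a ha, ← hRa, ← hRb, heq]
    have hstep : pvBStep comp a b = comp := by
      show (if comp.getD a 0 ≠ comp.getD b 0 then
          comp.map (fun c => if c = comp.getD b 0 then comp.getD a 0 else c) else comp) = comp
      rw [if_neg (not_not_intro hcab)]
    rw [hunf, if_pos heq, hstep]
    refine ⟨⟨dep, hg2⟩, hlenC, ?_⟩
    intro x y hx hy
    rw [rt2 x hx, rt2 y hy, rt1 x hx, rt1 y hy]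
    exact hrel x y hx hy
  · -- merge: A sets one root under the other, B relabels cb -> ca
    have hrane : pvRoot p n a ≠ pvRoot p n b := by rw [← hRa, ← hRb]; exact heq
    have hcne : comp.getD a 0 ≠ comp.getD b 0 := by
      intro hc
      exact hrane ((hiff_b a ha).mpr hc)
    have hstep : pvBStep comp a b =
        comp.map (fun c => if c = comp.getD b 0 then comp.getD a 0 else c) := by
      show (if comp.getD a 0 ≠ comp.getD b 0 then
          comp.map (fun c => if c = comp.getD b 0 then comp.getD a 0 else c) else comp) = _
      rw [if_pos hcne]
    set pr := if size.getD F1.2 0 < size.getD F2.2 0 then (F2.2, F1.2) else (F1.2, F2.2) with hpr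
    have hprcases : (pr.1 = pvRoot p n a ∧ pr.2 = pvRoot p n b) ∨
        (pr.1 = pvRoot p n b ∧ pr.2 = pvRoot p n a) := by
      rw [hpr]
      split_ifs
      · right; exact ⟨hRb, hRa⟩
      · left; exact ⟨hRa, hRb⟩
    have hroots2 : ∀ x, x < n → pvRoot F2.1 n x = pvRoot p n x := by
      intro x hx
      rw [rt2 x hx, rt1 x hx]
    have hralt : pvRoot p n a < n := by
      rw [← hroots2 a ha]
      exact (pvRoot_spec F2.1 n dep hg2 ha).2
    have hrblt : pvRoot p n b < n := by
      rw [← hroots2 b hb]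
      exact (pvRoot_spec F2.1 n dep hg2 hb).2
    have hraroot : pvIsRoot F2.1 (pvRoot p n a) := by
      have := (pvRoot_spec F2.1 n dep hg2 ha).1
      rwa [hroots2 a ha] at this
    have hrbroot : pvIsRoot F2.1 (pvRoot p n b) := by
      have := (pvRoot_spec F2.1 n dep hg2 hb).1
      rwa [hroots2 b hb] at this
    have hp1lt : pr.1 < n := by rcases hprcases with ⟨h1, _⟩ | ⟨h1, _⟩ <;> rw [h1] <;> assumption
    have hp2lt : pr.2 < n := by rcases hprcases with ⟨_, h2⟩ | ⟨_, h2⟩ <;> rw [h2] <;> assumption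
    have hp1root : pvIsRoot F2.1 pr.1 := by
      rcases hprcases with ⟨h1, _⟩ | ⟨h1, _⟩ <;> rw [h1] <;> assumption
    have hp2root : pvIsRoot F2.1 pr.2 := by
      rcases hprcases with ⟨_, h2⟩ | ⟨_, h2⟩ <;> rw [h2] <;> assumption
    have hpne : pr.1 ≠ pr.2 := by
      rcases hprcases with ⟨h1, h2⟩ | ⟨h1, h2⟩ <;> rw [h1, h2]
      · exact hrane
      · exact hrane.symm
    obtain ⟨⟨dep', hg'⟩, hmap⟩ :=
      pvSet_root F2.1 n dep hg2 hp1lt hp2lt hp1root hp2root hpne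
    rw [hunf, if_neg heq, hstep]
    refine ⟨⟨dep', hg'⟩, by simpa using hlenC, ?_⟩
    intro x y hx hy
    have hmx := hmap x hx
    have hmy := hmap y hy
    rw [hroots2 x hx] at hmx
    rw [hroots2 y hy] at hmy
    show pvRoot (F2.1.set pr.2 pr.1) n x = pvRoot (F2.1.set pr.2 pr.1) n y ↔ _
    rw [hmx, hmy,
        pvGetD_map_lt comp _ x 0 0 (by omega), pvGetD_map_lt comp _ y 0 0 (by omega),
        pvCollapse, pvCollapse]
    have t1 := hiff_a x hx
    have t2 := hiff_b x hx
    have t3 := hiff_a y hy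
    have t4 := hiff_b y hy
    have t5 := hrel x y hx hy
    have habs : ∀ w, (w = pr.1 ∨ w = pr.2) ↔ (w = pvRoot p n a ∨ w = pvRoot p n b) := by
      intro w
      rcases hprcases with ⟨h1, h2⟩ | ⟨h1, h2⟩
      · rw [h1, h2]
      · rw [h1, h2]
        exact or_comm
    rw [habs, habs]
    rw [t5, t1, t2, t3, t4]

theorem pvLoop (n : Nat) :
    ∀ (es : List (Int × Nat × Nat)) (p comp : List Nat) (size : List Int),
    pvInv p comp n → (∀ e ∈ es, e.2.1 < n ∧ e.2.2 < n) →
    pvInv (es.foldl (fun st e => pvUnion st e.2.1 e.2.2) (p, size)).1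
          (es.foldl (fun c e => pvBStep c e.2.1 e.2.2) comp) n := by
  intro es
  induction es with
  | nil => intro p comp size h _; exact h
  | cons e es ih =>
    intro p comp size h hmem
    obtain ⟨ha, hb⟩ := hmem e List.mem_cons_self
    have hstep := pvUnion_inv n p comp size e.2.1 e.2.2 h ha hb
    simp only [List.foldl_cons]
    rw [show pvUnion (p, size) e.2.1 e.2.2 =
        ((pvUnion (p, size) e.2.1 e.2.2).1, (pvUnion (p, size) e.2.1 e.2.2).2) from rfl]
    exact ih _ _ _ hstep (fun e' he' => hmem e' (List.mem_cons_of_mem e he'))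

theorem pvGetD_range (n x d : Nat) (h : x < n) : (List.range n).getD x d = x := by
  rw [List.getD_eq_getElem _ _ (by simpa using h)]
  simp

theorem pvInv_init (n : Nat) : pvInv (List.range n) (List.range n) n := by
  have hroot : ∀ x, x < n → pvIsRoot (List.range n) x := by
    intro x hx
    show (List.range n).getD x x = x
    exact pvGetD_range n x x hx
  refine ⟨⟨fun _ => 0, by simp, ?_, ?_⟩, by simp, ?_⟩
  · intro x hx
    show (List.range n).getD x x < n
    rw [pvGetD_range n x x hx]; exact hx
  · intro x hx hnr
    exact absurd (hroot x hx) hnr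
  · intro x y hx hy
    rw [pvRoot_of_isRoot _ n (hroot x hx), pvRoot_of_isRoot _ n (hroot y hy),
        pvGetD_range n x 0 hx, pvGetD_range n y 0 hy]

-- ---------- A's counting loop (with find) is counting pure roots ----------

def pvCStep (pg : List Nat × PySem.Dict Nat Int) (i : Nat) : List Nat × PySem.Dict Nat Int :=
  let fr := pvFind pg.1.length pg.1 i
  (fr.1, pg.2.insert fr.2 (pg.2.getD fr.2 0 + 1))

theorem pvCount (n : Nat) (dep : Nat → Nat) :
    ∀ (l : List Nat) (p : List Nat) (d : PySem.Dict Nat Int),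
    pvGood p n dep → (∀ i ∈ l, i < n) →
    (l.foldl pvCStep (p, d)).2
      = (l.map (pvRoot p n)).foldl (fun d r => d.insert r (d.getD r 0 + 1)) d := by
  intro l
  induction l with
  | nil => intro p d hg hmem; rfl
  | cons i l ih =>
    intro p d hg hmem
    have hi : i < n := hmem i List.mem_cons_self
    have hlen : p.length = n := hg.1
    obtain ⟨o1, hg1, rt1⟩ := pvFind_use (f := p.length) hg hi (by omega)
    simp only [List.foldl_cons, List.map_cons]
    rw [show pvCStep (p, d) i
      = ((pvFind p.length p i).1,
         d.insert (pvFind p.length p i).2 (d.getD (pvFind p.length p i).2 0 + 1)) from rfl]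
    rw [ih _ _ hg1 (fun j hj => hmem j (List.mem_cons_of_mem i hj))]
    rw [o1]
    congr 1
    exact List.map_congr_left (fun j hj => rt1 j (hmem j (List.mem_cons_of_mem i hj)))

-- ---------- equal-kernel lists have equal counter values ----------

theorem pvSelf (l : List Nat) : l = (List.range l.length).map (fun i => l.getD i 0) := by
  apply List.ext_getElem (by simp)
  intro i h1 h2
  rw [List.getElem_map, List.getElem_range, List.getD_eq_getElem _ _ h1]

def pvFirstOcc (l : List Nat) : List Nat :=
  (List.range l.length).filter (fun i => decide (l.getD i 0 ∉ l.take i))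

theorem pvFirstOcc_mem_lt {l : List Nat} {i : Nat} (h : i ∈ pvFirstOcc l) : i < l.length := by
  unfold pvFirstOcc at h
  exact List.mem_range.mp (List.mem_of_mem_filter h)

theorem pvOfList_firstOcc (l : List Nat) :
    PySem.Set.ofList l = (pvFirstOcc l).map (fun i => l.getD i 0) := by
  induction l using List.reverseRecOn with
  | nil => rfl
  | append_singleton l x ih =>
    rw [PySem.Set.ofList_append_singleton]
    unfold pvFirstOcc
    rw [List.length_append, List.length_cons, List.length_nil, List.range_succ,
        List.filter_append]
    have hpred : ∀ i ∈ List.range l.length,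
        (decide ((l ++ [x]).getD i 0 ∉ (l ++ [x]).take i)) =
        (decide (l.getD i 0 ∉ l.take i)) := by
      intro i hi
      have hi' : i < l.length := List.mem_range.mp hi
      rw [List.getD_append l [x] 0 i hi', List.take_append_of_le_length (le_of_lt hi')]
    rw [List.filter_congr hpred]
    have hgetlast : (l ++ [x]).getD l.length 0 = x := by
      rw [List.getD_append_right l [x] 0 l.length (by omega)]
      simp
    have htake : (l ++ [x]).take l.length = l := List.take_left
    have hmap : ∀ (s : List Nat), (∀ i ∈ s, i < l.length) →
        s.map (fun i => (l ++ [x]).getD i 0) = s.map (fun i => l.getD i 0) := by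
      intro s hs
      exact List.map_congr_left (fun i hi => List.getD_append l [x] 0 i (hs i hi))
    have hfo : ∀ i ∈ (List.range l.length).filter (fun i => decide (l.getD i 0 ∉ l.take i)),
        i < l.length := fun i hi => List.mem_range.mp (List.mem_of_mem_filter hi)
    by_cases hx : x ∈ l
    · rw [PySem.Set.add_of_mem (by rw [PySem.Set.mem_ofList]; exact hx)]
      have hsing : (List.filter (fun i => decide ((l ++ [x]).getD i 0 ∉ (l ++ [x]).take i))
          [l.length]) = [] := by
        simp [List.filter, htake, hx]
      rw [hsing, List.append_nil, hmap _ hfo]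
      exact ih
    · rw [PySem.Set.add_of_not_mem (by rw [PySem.Set.mem_ofList]; exact hx)]
      have hsing : (List.filter (fun i => decide ((l ++ [x]).getD i 0 ∉ (l ++ [x]).take i))
          [l.length]) = [l.length] := by
        simp [List.filter, htake, hx]
      rw [hsing, List.map_append, hmap _ hfo, ih]
      congr 1
      simp only [List.map_cons, List.map_nil, hgetlast]

theorem pvMemTake (l : List Nat) {i : Nat} (hi : i < l.length) (v : Nat) :
    v ∈ l.take i ↔ ∃ j, j < i ∧ l.getD j 0 = v := by
  constructor
  · intro h
    obtain ⟨j, hj, hje⟩ := List.getElem_of_mem h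
    have hj' : j < i := by
      have h2 := hj
      simp [List.length_take] at h2
      omega
    have hjl : j < l.length := by omega
    refine ⟨j, hj', ?_⟩
    rw [List.getD_eq_getElem _ _ hjl]
    exact (List.getElem_take (h := hj)).symm.trans hje
  · rintro ⟨j, hj, hje⟩
    have hjl : j < l.length := by omega
    have hjt : j < (l.take i).length := by simp [List.length_take]; omega
    have hv : (l.take i)[j] = v := by
      rw [List.getElem_take, ← List.getD_eq_getElem _ 0 hjl]
      exact hje
    rw [← hv]
    exact List.getElem_mem hjt

theorem pvCount_eq (n : Nat) (l : List Nat) (hl : l.length = n) (v : Nat) :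
    List.count v l = (List.range n).countP (fun j => l.getD j 0 == v) := by
  conv_lhs => rw [pvSelf l, hl]
  rw [List.count_eq_countP, List.countP_map]
  rfl

theorem pvCV (n : Nat) (la lb : List Nat) (hla : la.length = n) (hlb : lb.length = n)
    (ker : ∀ i j, i < n → j < n → (la.getD i 0 = la.getD j 0 ↔ lb.getD i 0 = lb.getD j 0)) :
    (PySem.Dict.counter la).values = (PySem.Dict.counter lb).values := by
  have hvals : ∀ l : List Nat,
      (PySem.Dict.counter l).values =
        (PySem.Set.ofList l).map (fun k => ((List.count k l : Nat) : Int)) := by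
    intro l
    show (PySem.Dict.counter l).items.map (·.2) = _
    rw [PySem.Dict.items_counter, List.map_map]
    rfl
  rw [hvals la, hvals lb, pvOfList_firstOcc la, pvOfList_firstOcc lb, List.map_map,
      List.map_map]
  have hfo : pvFirstOcc la = pvFirstOcc lb := by
    unfold pvFirstOcc
    rw [hla, hlb]
    apply List.filter_congr
    intro i hi
    have hi' : i < n := List.mem_range.mp hi
    rw [decide_eq_decide]
    apply not_congr
    rw [pvMemTake la (by omega) _, pvMemTake lb (by omega) _]
    constructor
    · rintro ⟨j, hj, hje⟩
      exact ⟨j, hj, (ker j i (by omega) hi').mp hje⟩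
    · rintro ⟨j, hj, hje⟩
      exact ⟨j, hj, (ker j i (by omega) hi').mpr hje⟩
  rw [hfo]
  apply List.map_congr_left
  intro i hi
  have hi' : i < n := by
    have := pvFirstOcc_mem_lt hi
    omega
  show ((List.count (la.getD i 0) la : Nat) : Int) = ((List.count (lb.getD i 0) lb : Nat) : Int)
  rw [pvCount_eq n la hla, pvCount_eq n lb hlb]
  congr 1
  apply List.countP_congr
  intro j hj
  have hj' : j < n := List.mem_range.mp hj
  simp only [beq_iff_eq]
  exact ker j i hj' hi'

-- ---------- loop-shape bridges between the two ports ----------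

theorem pvFoldTakeU (edges : List (Int × Nat × Nat)) :
    ∀ (m : Nat) (st : List Nat × List Int),
    (List.range m).foldl (fun s k => match edges[k]? with
      | some e => pvUnion s e.2.1 e.2.2
      | none => s) st
    = (edges.take m).foldl (fun s e => pvUnion s e.2.1 e.2.2) st := by
  intro m
  induction m with
  | zero => intro st; simp
  | succ m ih =>
    intro st
    rw [List.range_succ, List.foldl_append, ih, List.take_add_one]
    cases hk : edges[m]? with
    | none => simp [hk]
    | some e => simp [hk]

theorem pvFoldIdxU (edges : List (Int × Nat × Nat)) (K : Int) (st : List Nat × List Int) :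
    (PySem.List.pyRange 0 K 1).foldl (fun s i => match PySem.List.pyGet? edges i with
      | some e => pvUnion s e.2.1 e.2.2
      | none => s) st
    = (edges.take (max K 0).toNat).foldl (fun s e => pvUnion s e.2.1 e.2.2) st := by
  rw [PySem.List.pyRange_one, List.foldl_map]
  have hm : ((K : Int) - 0).toNat = (max K 0).toNat := by omega
  rw [hm, ← pvFoldTakeU edges (max K 0).toNat st]
  apply PySem.List.foldl_congr_mem
  intro acc k _
  rw [show (0 : Int) + (k : Int) = (k : Int) by omega, PySem.List.pyGet?_natCast]

theorem pvEdges_eq (g : Nat → Nat → (Int × Nat × Nat)) (n : Nat) :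
    (PySem.List.combinations (List.range n) 2).foldl (fun acc c =>
      match c with
      | [i, j] => acc ++ [g i j]
      | _ => acc) []
    = (List.range n).foldl (fun acc i =>
        ((List.range n).drop (i+1)).foldl (fun acc2 j => acc2 ++ [g i j]) acc) [] := by
  have hA : ∀ (l : List Nat) (acc : List (Int × Nat × Nat)),
      (PySem.List.combinations l 2).foldl (fun acc c =>
        match c with
        | [i, j] => acc ++ [g i j]
        | _ => acc) acc
      = acc ++ (PySem.List.combinations l 2).flatMap (fun c =>
          match c with
          | [i, j] => [g i j]
          | _ => []) := by
    intro l acc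
    rw [← PySem.List.foldl_append_eq_flatMap]
    apply PySem.List.foldl_congr_mem
    intro a c _
    match c with
    | [] => simp
    | [i] => simp
    | [i, j] => rfl
    | i :: j :: k :: t => simp
  have hB : ∀ (l : List Nat) (acc : List (Int × Nat × Nat)),
      l.foldl (fun acc i =>
        ((List.range n).drop (i+1)).foldl (fun acc2 j => acc2 ++ [g i j]) acc) acc
      = acc ++ l.flatMap (fun i => ((List.range n).drop (i+1)).map (g i)) := by
    intro l acc
    rw [← PySem.List.foldl_append_eq_flatMap]
    apply PySem.List.foldl_congr_mem
    intro a i _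
    rw [PySem.List.foldl_append_singleton_eq_map]
  rw [hA, hB, List.nil_append, List.nil_append]
  have key : ∀ (m a : Nat), a + m = n →
      (PySem.List.combinations ((List.range n).drop a) 2).flatMap (fun c =>
        match c with
        | [i, j] => [g i j]
        | _ => [])
      = ((List.range n).drop a).flatMap (fun i => ((List.range n).drop (i+1)).map (g i)) := by
    intro m
    induction m with
    | zero =>
      intro a ha
      rw [List.drop_of_length_le (by simp; omega)]
      rfl
    | succ m ih =>
      intro a ha
      have halt : a < n := by omega
      have hdrop : (List.range n).drop a = a :: (List.range n).drop (a+1) := by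
        rw [List.drop_eq_getElem_cons (by simpa using halt)]
        simp
      rw [hdrop, PySem.List.combinations_cons_succ, List.flatMap_append, List.flatMap_cons]
      rw [PySem.List.combinations_one]
      congr 1
      · rw [List.map_map, List.flatMap_map]
        calc ((List.range n).drop (a+1)).flatMap
              (fun j => (fun c => match c with
                | [i, j] => [g i j]
                | _ => ([] : List (Int × Nat × Nat))) (((a :: ·) ∘ (fun x => [x])) j))
            = ((List.range n).drop (a+1)).flatMap (fun j => [g a j]) := rfl
          _ = ((List.range n).drop (a+1)).map (g a) := List.map_eq_flatMap.symm
      · exact ih (a+1) (by omega)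
  have hkey := key n 0 (by omega)
  simpa using hkey

theorem pvEdgesB_bound (points : List (Int × Int × Int)) (n : Nat) :
    ∀ e ∈ (List.range n).foldl (fun acc i =>
        ((List.range n).drop (i+1)).foldl (fun acc2 j => acc2 ++ [pvEdgeB points i j]) acc) [],
      e.2.1 < n ∧ e.2.2 < n := by
  intro e he
  have hB : (List.range n).foldl (fun acc i =>
      ((List.range n).drop (i+1)).foldl (fun acc2 j => acc2 ++ [pvEdgeB points i j]) acc) []
      = (List.range n).flatMap (fun i => ((List.range n).drop (i+1)).map (pvEdgeB points i)) := by
    rw [← List.nil_append ((List.range n).flatMap _), ← PySem.List.foldl_append_eq_flatMap]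
    apply PySem.List.foldl_congr_mem
    intro a i _
    rw [PySem.List.foldl_append_singleton_eq_map]
  rw [hB] at he
  obtain ⟨i, hi, he2⟩ := List.mem_flatMap.mp he
  obtain ⟨j, hj, rfl⟩ := List.mem_map.mp he2
  have hj' : j < n := List.mem_range.mp (List.mem_of_mem_drop hj)
  exact ⟨List.mem_range.mp hi, hj'⟩

-- ---------- the main semantic equality ----------

theorem pvResult (n : Nat) (es : List (Int × Nat × Nat))
    (hmem : ∀ e ∈ es, e.2.1 < n ∧ e.2.2 < n) :
    ((List.range n).foldl pvCStep
      ((es.foldl (fun st e => pvUnion st e.2.1 e.2.2)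
          (List.range n, List.replicate n (1 : Int))).1, PySem.Dict.empty)).2.values
    = ((es.foldl (fun c e => pvBStep c e.2.1 e.2.2) (List.range n)).foldl
        (fun (d : PySem.Dict Nat Int) c => d.insert c (d.getD c 0 + 1))
        PySem.Dict.empty).values := by
  obtain ⟨⟨dep, hgF⟩, hlenC, hrelF⟩ :=
    pvLoop n es (List.range n) (List.range n) (List.replicate n (1 : Int)) (pvInv_init n) hmem
  rw [pvCount n dep (List.range n) _ PySem.Dict.empty hgF (fun i hi => List.mem_range.mp hi)]
  rw [PySem.Dict.foldl_insert_getD_add_one_eq_counter,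
      PySem.Dict.foldl_insert_getD_add_one_eq_counter]
  apply pvCV n _ _ (by simp) hlenC
  intro i j hi hj
  rw [PySem.List.getD_map_range _ n i 0 hi, PySem.List.getD_map_range _ n j 0 hj]
  exact hrelF i j hi hj

-- the common tail of both ports: sort the group sizes and multiply the top three
def pvTail (vals : List Int) : Int :=
  match PySem.List.pyGet? (PySem.List.sorted vals (fun v => v) true) 0,
        PySem.List.pyGet? (PySem.List.sorted vals (fun v => v) true) 1,
        PySem.List.pyGet? (PySem.List.sorted vals (fun v => v) true) 2 with
  | some a, some b, some c => a * b * c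
  | _, _, _ => 0

-- the same tail in B's nested-match shape
def pvTailB (vals : List Int) : Int :=
  match PySem.List.pyGet? (PySem.List.sorted vals (fun v => v) true) 0 with
  | none => 0
  | some a =>
    match PySem.List.pyGet? (PySem.List.sorted vals (fun v => v) true) 1 with
    | none => 0
    | some b =>
      match PySem.List.pyGet? (PySem.List.sorted vals (fun v => v) true) 2 with
      | none => 0
      | some c => a * b * c

theorem pvTailB_eq (v : List Int) : pvTailB v = pvTail v := by
  unfold pvTail pvTailB
  cases PySem.List.pyGet? (PySem.List.sorted v (fun x => x) true) 0 <;>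
    cases PySem.List.pyGet? (PySem.List.sorted v (fun x => x) true) 1 <;>
      cases PySem.List.pyGet? (PySem.List.sorted v (fun x => x) true) 2 <;> rfl

-- ports agree on every input (Pre_solve marks where the Python A returns at all)
theorem pvMain (points : List (Int × Int × Int)) (K : Int) :
    solve points K = solve_alt points K := by
  have hA : solve points K = pvTail
      (((List.range points.length).foldl pvCStep
        ((((PySem.List.pyRange 0 K 1).foldl (fun st i =>
            match PySem.List.pyGet? (PySem.List.sorted
              ((PySem.List.combinations (List.range points.length) 2).foldl (fun acc c =>
                match c with
                | [i, j] => acc ++ [pvEdgeA points i j]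
                | _ => acc) [])
              (fun e => toLex (e.1, toLex ((e.2.1 : Int), (e.2.2 : Int))))) i with
            | some e => pvUnion st e.2.1 e.2.2
            | none => st)
          (List.range points.length, List.replicate points.length (1 : Int))).1),
         PySem.Dict.empty)).2.values) := rfl
  have hB : solve_alt points K = pvTailB
      (((PySem.List.slice (PySem.List.sorted
          ((List.range points.length).foldl (fun acc i =>
            ((List.range points.length).drop (i+1)).foldl
              (fun acc2 j => acc2 ++ [pvEdgeB points i j]) acc) [])
          (fun e => toLex (e.1, toLex ((e.2.1 : Int), (e.2.2 : Int)))))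
          none (some (max K 0))).foldl
        (fun c (e : Int × Nat × Nat) => pvBStep c e.2.1 e.2.2) (List.range points.length)).foldl
        (fun (d : PySem.Dict Nat Int) c => d.insert c (d.getD c 0 + 1))
        PySem.Dict.empty).values := rfl
  rw [hA, hB, pvTailB_eq]
  apply congrArg pvTail
  rw [show pvEdgeA = pvEdgeB from rfl]
  rw [pvEdges_eq (pvEdgeB points) points.length]
  rw [pvFoldIdxU, PySem.List.slice_to _ (le_max_right K 0)]
  have hmem : ∀ e ∈ (PySem.List.sorted
      ((List.range points.length).foldl (fun acc i =>
        ((List.range points.length).drop (i+1)).foldl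
          (fun acc2 j => acc2 ++ [pvEdgeB points i j]) acc) [])
      (fun e => toLex (e.1, toLex ((e.2.1 : Int), (e.2.2 : Int))))).take (max K 0).toNat,
      e.2.1 < points.length ∧ e.2.2 < points.length := by
    intro e he
    apply pvEdgesB_bound points points.length
    exact ((PySem.List.sorted_perm _ _ _).mem_iff).mp (List.mem_of_mem_take he)
  exact pvResult points.length _ hmem

-- ===== VERDICT (by name: the statement is the Claim_ definition above) =====
theorem solve_spec : Claim_equal_solve := by
  intro points K _ _
  exact pvMain points K
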